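-- pv_equiv track=rewrite | github.com/brenthompson2/AdventOfCode2020 | Day06/star2.py | parse_batch
-- ===== SOURCE A (Python) =====
-- def parse_batch(lines, i):
--     """
--     Get the characters mentioned by everyone in the group, while controling the index
--     """
--     # Create initial collection of chars
--     chars = []
--     line = lines[i].strip()
--     if not is_empty_line(line):
--         for char in line:
--             chars.append(char)
--
--     # Process remaining collections in group
--     i = i + 1
--     if i == len(lines):
--         return (chars, i)
--     line = lines[i].strip()
--     while not is_empty_line(line):
--         # Trim chars based on line
--         updated_chars = []
--         for char in chars:
--             if char in line:
--                 updated_chars.append(char)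
--         chars = updated_chars
--
--         # Get next line
--         i = i + 1
--         if i == len(lines):
--             return (chars, i)
--         line = lines[i].strip()
--
--     i = i + 1
--     return (chars, i)
--
-- def is_empty_line(line):
--     """
--     Get whether or not the line is empty
--     https://stackoverflow.com/questions/7896495/python-how-to-check-if-a-line-is-an-empty-line
--     """
--     return line in ('\n', '\r\n', '')
-- ===== SOURCE B (Python) =====
-- def parse_batch(lines, i):
--     """Get the characters mentioned by everyone in the group, while controlling the index."""
--     tail = [line.strip() for line in lines[i:]]
--     first, rest = tail[0], tail[1:]
--     blank = rest.index('') + 1 if '' in rest else len(tail)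
--     group = rest[:blank - 1]
--     chars = [c for c in first if all(c in line for line in group)]
--     return (chars, min(i + blank + 1, len(lines)))
-- ===== Notes on version B (the rewrite author's own statement) =====
-- stated objective: alternative
-- what changed: Replaces A's index-juggling rebuild-and-trim loop (chars list re-filtered once per scanned line, three return sites) by a slice-based decomposition: strip the suffix lines[i:] once, locate the blank separator with one index() lookup, take the group as a slice, and keep the first line's characters common to the group in a single comprehension.
-- intended difference: On negative start indices whose suffix lines[i+1:] contains no blank stripped line, A's absolute index increments wrap past the end and re-scan lines from the head of the list (further filtering the characters against unrelated earlier lines and deriving the returned index from that second scan), while B reads only the suffix lines[i:] and returns its group's common characters with the next index clamped to the list; reading only the suffix is the intended behaviour. — e.g. on parse_batch(["b", "ab"], -1): A returns (["b"], 2), B returns (["a", "b"], 1)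
import Mathlib
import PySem

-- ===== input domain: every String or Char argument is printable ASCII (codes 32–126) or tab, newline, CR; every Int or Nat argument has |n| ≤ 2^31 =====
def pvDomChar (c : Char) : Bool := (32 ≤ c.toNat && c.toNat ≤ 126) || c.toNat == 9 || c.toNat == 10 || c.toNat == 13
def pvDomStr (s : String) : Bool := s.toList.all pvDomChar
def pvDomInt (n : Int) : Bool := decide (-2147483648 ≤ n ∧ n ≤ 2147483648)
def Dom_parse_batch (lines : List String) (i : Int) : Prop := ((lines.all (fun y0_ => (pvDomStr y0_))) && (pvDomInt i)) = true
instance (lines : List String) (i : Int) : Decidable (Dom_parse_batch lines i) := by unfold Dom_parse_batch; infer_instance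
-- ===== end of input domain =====

-- B strips the suffix lines[i:] once, finds the blank separator with one index() lookup and
-- intersects the first line's characters with the sliced group (objective: alternative).

-- ===== PORT A =====
def is_empty_line (line : String) : Bool :=
  line == "\n" || line == "\r\n" || line == ""

-- A's while loop; j is the index BEFORE the 'i = i + 1' at the top of each round.
-- pyGet? = none is where the Python raises IndexError (outside Pre_).
def parse_batch_loop (lines : List String) (chars : List String) (j : Int) :
    List String × Int :=
  if j + 1 = (lines.length : Int) then (chars, j + 1)
  else
    match hget : PySem.List.pyGet? lines (j + 1) with
    | none => (chars, j + 1)   -- IndexError in Python; excluded by Pre_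
    | some l =>
      let line := PySem.Str.strip l
      if is_empty_line line then (chars, j + 2)
      else
        parse_batch_loop lines
          (chars.filter (fun c => PySem.Str.isIn c line)) (j + 1)
termination_by ((lines.length : Int) - j).toNat
decreasing_by
  have : PySem.Raise.InRange lines.length (j + 1) := by
    by_contra hc
    rw [← PySem.List.pyGet?_eq_none_iff] at hc
    simp [hc] at hget
  unfold PySem.Raise.InRange at this
  omega

def parse_batch (lines : List String) (i : Int) : List String × Int :=
  match PySem.List.pyGet? lines i with
  | none => ([], i)            -- IndexError in Python; excluded by Pre_
  | some l0 =>
    let line := PySem.Str.strip l0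
    let chars : List String :=
      if is_empty_line line then [] else line.toList.map (fun c => String.ofList [c])
    parse_batch_loop lines chars i

-- ===== PORT B =====
def parse_batch_alt (lines : List String) (i : Int) : List String × Int :=
  let tail := (PySem.List.slice lines (some i) none).map PySem.Str.strip
  match tail with
  | [] => ([], i)              -- tail[0] raises IndexError in Python; excluded by Pre_
  | first :: rest =>
    let blank : Int :=
      match PySem.List.index? rest "" with
      | some k => (k : Int) + 1                 -- '' in rest: rest.index('') + 1
      | none => (rest.length : Int) + 1         -- else len(tail)
    let group := PySem.List.slice rest none (some (blank - 1))
    let chars := (first.toList.filter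
        (fun c => group.all (fun line => PySem.Str.isIn (String.ofList [c]) line))).map
        (fun c => String.ofList [c])
    (chars, min (i + blank + 1) (lines.length : Int))

-- ===== PRECONDITION & SPEC =====
-- Pre_ excludes exactly the inputs where Python A raises IndexError at lines[i].
def Pre_parse_batch (lines : List String) (i : Int) : Prop :=
  PySem.Raise.InRange lines.length i
instance (lines : List String) (i : Int) : Decidable (Pre_parse_batch lines i) := by
  unfold Pre_parse_batch; infer_instance

def pvWitness_parse_batch : List String × Int := (["ab", "b", "", "c"], 0)

-- On negative start indices whose suffix lines[i+1:] contains no blank stripped line, A's absolute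
-- index increments wrap past the end and re-scan lines from the head of the list (further filtering
-- the characters against unrelated earlier lines and deriving the returned index from that second
-- scan), while B reads only the suffix lines[i:] and returns its group's common characters with the
-- next index clamped to the list; reading only the suffix is the intended behaviour.
def D_parse_batch (lines : List String) (i : Int) : Prop :=
  i < 0 ∧ 1 < lines.length ∧
    (∀ l ∈ lines.take 1, PySem.Str.strip l ≠ "") ∧
    (∀ l ∈ lines.drop ((lines.length : Int) + i + 1).toNat, PySem.Str.strip l ≠ "")
instance (lines : List String) (i : Int) : Decidable (D_parse_batch lines i) := by
  unfold D_parse_batch; infer_instance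

def Spec_parse_batch (lines : List String) (i : Int) (out : List String × Int) : Prop := ¬ D_parse_batch lines i → out = parse_batch_alt lines i
instance (lines : List String) (i : Int) (out : List String × Int) : Decidable (Spec_parse_batch lines i out) := by unfold Spec_parse_batch; infer_instance

def pvDiffWitness_parse_batch : List String × Int := (["b", "ab"], -1)
def pvDiffWitnessOut_parse_batch : (List String × Int) × (List String × Int) :=
  ((["b"], 2), (["a", "b"], 1))

-- ===== CLAIM (what is proved, stated in full; the proofs are below) =====
def Claim_unchanged_parse_batch : Prop := ∀ (lines : List String) (i : Int), Dom_parse_batch lines i → Pre_parse_batch lines i → Spec_parse_batch lines i (parse_batch lines i)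
def Claim_changed_parse_batch : Prop := Dom_parse_batch (pvDiffWitness_parse_batch.1) (pvDiffWitness_parse_batch.2) ∧ Pre_parse_batch (pvDiffWitness_parse_batch.1) (pvDiffWitness_parse_batch.2) ∧ D_parse_batch (pvDiffWitness_parse_batch.1) (pvDiffWitness_parse_batch.2) ∧ parse_batch (pvDiffWitness_parse_batch.1) (pvDiffWitness_parse_batch.2) = pvDiffWitnessOut_parse_batch.1 ∧ parse_batch_alt (pvDiffWitness_parse_batch.1) (pvDiffWitness_parse_batch.2) = pvDiffWitnessOut_parse_batch.2 ∧ pvDiffWitnessOut_parse_batch.1 ≠ pvDiffWitnessOut_parse_batch.2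
def Claim_exact_parse_batch : Prop := ∀ (lines : List String) (i : Int), Dom_parse_batch lines i → Pre_parse_batch lines i → D_parse_batch lines i → parse_batch lines i ≠ parse_batch_alt lines i

-- ===== LEMMAS AND PROOFS =====

lemma head?_dropWhile_false {α : Type} (p : α → Bool) :
    ∀ (l : List α) (c : α), (l.dropWhile p).head? = some c → p c = false := by
  intro l
  induction l with
  | nil => intro c h; simp [List.dropWhile] at h
  | cons a t ih =>
    intro c h
    by_cases hp : p a = true
    · rw [List.dropWhile_cons_of_pos hp] at h; exact ih c h
    · rw [List.dropWhile_cons_of_neg hp] at h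
      simp at h
      subst h
      simpa using hp

lemma strip_getLast?_not_space (xs : List Char) (c : Char)
    (h : (PySem.Chars.strip xs).getLast? = some c) : PySem.Chars.isspace c = false := by
  unfold PySem.Chars.strip PySem.Chars.rstrip at h
  rw [List.getLast?_reverse] at h
  exact head?_dropWhile_false _ _ c h

lemma strip_ne_nl (l : String) : (PySem.Str.strip l).toList ≠ ['\n'] := by
  intro h
  rw [PySem.Str.toList_strip] at h
  have := strip_getLast?_not_space l.toList '\n' (by rw [h]; rfl)
  simp [PySem.Chars.isspace] at this

lemma strip_ne_crnl (l : String) : (PySem.Str.strip l).toList ≠ ['\r', '\n'] := by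
  intro h
  rw [PySem.Str.toList_strip] at h
  have := strip_getLast?_not_space l.toList '\n' (by rw [h]; rfl)
  simp [PySem.Chars.isspace] at this

lemma is_empty_line_strip (l : String) :
    is_empty_line (PySem.Str.strip l) = (PySem.Str.strip l == "") := by
  unfold is_empty_line
  have h1 : (PySem.Str.strip l == "\n") = false := by
    apply beq_eq_false_iff_ne.mpr
    intro h; exact strip_ne_nl l (by rw [h]; rfl)
  have h2 : (PySem.Str.strip l == "\r\n") = false := by
    apply beq_eq_false_iff_ne.mpr
    intro h; exact strip_ne_crnl l (by rw [h]; rfl)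
  simp [h1, h2]

-- Reference scan used only by the proofs: the stripped lines of the group from index j on,
-- together with the index A's loop ends at.
def collect_rest (lines : List String) (j : Int) : List String × Int :=
  if j = (lines.length : Int) then ([], j)
  else
    match hget : PySem.List.pyGet? lines j with
    | none => ([], j)
    | some l =>
      let s := PySem.Str.strip l
      if s == "" then ([], j + 1)
      else
        let r := collect_rest lines (j + 1)
        (s :: r.1, r.2)
termination_by ((lines.length : Int) - j).toNat
decreasing_by
  have : PySem.Raise.InRange lines.length j := by
    by_contra hc
    rw [← PySem.List.pyGet?_eq_none_iff] at hc
    simp [hc] at hget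
  unfold PySem.Raise.InRange at this
  omega

-- A's trimming loop computes: keep the chars present in every line of the collected rest,
-- and the collected final index.
lemma loop_eq_collect (lines : List String) : ∀ (j : Int) (chars : List String),
    parse_batch_loop lines chars j =
      (chars.filter (fun c => (collect_rest lines (j + 1)).1.all (fun l => PySem.Str.isIn c l)),
       (collect_rest lines (j + 1)).2) := by
  intro j chars
  rw [parse_batch_loop, collect_rest]
  by_cases hlen : j + 1 = (lines.length : Int)
  · simp [hlen]
  · simp only [hlen, if_false]
    cases hget : PySem.List.pyGet? lines (j + 1) with
    | none => simp
    | some l =>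
      simp only []
      rw [is_empty_line_strip]
      by_cases hemp : (PySem.Str.strip l == "") = true
      · simp only [hemp, if_true]
        simp
        omega
      · rw [Bool.not_eq_true] at hemp
        simp only [hemp]
        rw [loop_eq_collect lines (j + 1)
          (chars.filter (fun c => PySem.Str.isIn c (PySem.Str.strip l)))]
        simp only [List.filter_filter, Bool.false_eq_true, if_false, List.all_cons]
        congr 1
        exact List.filter_congr (fun a _ => Bool.and_comm _ _)
termination_by j => ((lines.length : Int) - j).toNat
decreasing_by
  have : PySem.Raise.InRange lines.length (j + 1) := by
    by_contra hc
    rw [← PySem.List.pyGet?_eq_none_iff] at hc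
    simp [hc] at hget
  unfold PySem.Raise.InRange at this
  omega

-- Pure-list model of the scan over a list of already-stripped lines: the kept group and the
-- number of consumed entries (including a terminating blank).
def grp : List String → List String × Int
  | [] => ([], 0)
  | t :: r => if t == "" then ([], 1) else (t :: (grp r).1, (grp r).2 + 1)

lemma grp_cons_ne (t : String) (r : List String) (h : ¬ t = "") :
    grp (t :: r) = (t :: (grp r).1, (grp r).2 + 1) := by
  simp [grp, h]

lemma grp_nonneg : ∀ ts : List String, 0 ≤ (grp ts).2 := by
  intro ts
  induction ts with
  | nil => simp [grp]
  | cons t r ih => by_cases h : t = "" <;> simp [grp, h] <;> omega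

lemma grp_not_mem : ∀ ts : List String, "" ∉ ts → grp ts = (ts, (ts.length : Int)) := by
  intro ts
  induction ts with
  | nil => intro _; simp [grp]
  | cons t r ih =>
    intro h
    have ht : ¬ t = "" := by intro he; exact h (by simp [he])
    have hr : "" ∉ r := fun hm => h (by simp [hm])
    rw [grp_cons_ne t r ht, ih hr]
    simp
    try omega

lemma grp_mem : ∀ ts : List String, "" ∈ ts →
    ∃ k : ℕ, PySem.List.index? ts "" = some k ∧ k < ts.length ∧
      grp ts = (ts.take k, (k : Int) + 1) := by
  intro ts
  induction ts with
  | nil => intro h; simp at h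
  | cons t r ih =>
    intro h
    by_cases ht : t = ""
    · subst ht
      exact ⟨0, PySem.List.index?_cons_self _ _, by simp, by simp [grp]⟩
    · have hr : "" ∈ r := by
        rcases List.mem_cons.mp h with h1 | h1
        · exact absurd h1.symm ht
        · exact h1
      obtain ⟨k, hk, hklt, hg⟩ := ih hr
      refine ⟨k + 1, ?_, by simpa using hklt, ?_⟩
      · rw [PySem.List.index?_cons_of_ne r ht, hk]
        rfl
      · rw [grp_cons_ne t r ht, hg]
        simp only [List.take_succ_cons, Prod.mk.injEq, true_and]
        push_cast
        ring

-- collect_rest at a nonnegative index is the pure scan over the stripped suffix.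
lemma collect_nonneg (lines : List String) (j : ℕ) :
    collect_rest lines (j : Int) =
      ((grp ((lines.drop j).map PySem.Str.strip)).1,
       (j : Int) + (grp ((lines.drop j).map PySem.Str.strip)).2) := by
  rw [collect_rest]
  by_cases hj : j < lines.length
  · have hne : ¬ (j : Int) = (lines.length : Int) := by omega
    have hget : PySem.List.pyGet? lines (j : Int) = some lines[j] := by
      rw [PySem.List.pyGet?_natCast]
      simp [hj]
    simp only [hne, if_false]
    rw [hget]
    have hdrop : lines.drop j = lines[j] :: lines.drop (j + 1) :=
      List.drop_eq_getElem_cons hj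
    rw [hdrop]
    simp only [List.map_cons]
    by_cases hemp : (PySem.Str.strip lines[j] == "") = true
    · have : PySem.Str.strip lines[j] = "" := by simpa using hemp
      simp [hemp, grp, this]
    · have hne' : ¬ PySem.Str.strip lines[j] = "" := by simpa using hemp
      simp only [hemp, Bool.false_eq_true, if_false]
      have : ((j : Int) + 1) = ((j + 1 : ℕ) : Int) := by push_cast; ring
      rw [this, collect_nonneg lines (j + 1)]
      rw [grp_cons_ne _ _ hne']
      simp
      push_cast
      ring
  · -- j ≥ length: both sides are ([], j)
    have hdrop : lines.drop j = [] := List.drop_eq_nil_of_le (by omega)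
    by_cases he : (j : Int) = (lines.length : Int)
    · simp [he, hdrop, grp]
    · have hnone : PySem.List.pyGet? lines (j : Int) = none := by
        rw [PySem.List.pyGet?_eq_none_iff]
        unfold PySem.Raise.InRange
        omega
      simp only [he, if_false]
      rw [hnone]
      simp [hdrop, grp]
termination_by lines.length - j

-- collect_rest at a negative index, when the stripped suffix contains a blank line:
-- the scan never reaches the end of the list, so it matches the pure scan.
lemma collect_neg_mem (lines : List String) (k : ℕ) (hk1 : 1 ≤ k) (hk : k ≤ lines.length)
    (hmem : "" ∈ (lines.drop (lines.length - k)).map PySem.Str.strip) :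
    collect_rest lines (-(k : Int)) =
      ((grp ((lines.drop (lines.length - k)).map PySem.Str.strip)).1,
       -(k : Int) + (grp ((lines.drop (lines.length - k)).map PySem.Str.strip)).2) := by
  induction k with
  | zero => omega
  | succ k' ih =>
    have hs : lines.length - (k' + 1) < lines.length := by omega
    have hget : PySem.List.pyGet? lines (-((k' + 1 : ℕ) : Int)) =
        some lines[lines.length - (k' + 1)] := by
      rw [PySem.List.pyGet?_neg_natCast lines (k' + 1) (by omega) hk]
      simp [hs]
    have hdrop : lines.drop (lines.length - (k' + 1)) =
        lines[lines.length - (k' + 1)] :: lines.drop (lines.length - (k' + 1) + 1) :=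
      List.drop_eq_getElem_cons hs
    have hne : ¬ (-((k' + 1 : ℕ) : Int)) = (lines.length : Int) := by
      intro h; omega
    rw [collect_rest]
    simp only [hne, if_false]
    rw [hget, hdrop]
    simp only [List.map_cons]
    by_cases hemp : (PySem.Str.strip lines[lines.length - (k' + 1)] == "") = true
    · have hb : PySem.Str.strip lines[lines.length - (k' + 1)] = "" := by simpa using hemp
      simp [hemp, grp, hb]
    · have hnb : ¬ PySem.Str.strip lines[lines.length - (k' + 1)] = "" := by simpa using hemp
      simp only [hemp, Bool.false_eq_true, if_false]
      -- the blank is strictly later, so k' ≥ 1 and the tail contains it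
      rw [hdrop] at hmem
      simp only [List.map_cons, List.mem_cons] at hmem
      rcases hmem with hmem | hmem
      · exact absurd hmem.symm hnb
      · have hk'1 : 1 ≤ k' := by
          by_contra hle
          have : k' = 0 := by omega
          subst this
          rw [show lines.length - 1 + 1 = lines.length from by omega] at hmem
          simp at hmem
        have harith : lines.length - (k' + 1) + 1 = lines.length - k' := by omega
        rw [harith] at hmem ⊢
        have hcast : (-((k' + 1 : ℕ) : Int)) + 1 = -((k' : ℕ) : Int) := by push_cast; ring
        rw [hcast, ih hk'1 (by omega) hmem]
        rw [grp_cons_ne _ _ hnb]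
        simp only [Prod.mk.injEq, true_and]
        push_cast
        ring

-- collect_rest at a negative index with no blank in the stripped suffix: the scan runs past the
-- end-of-list position (never equal to len while negative) and continues at index 0.
lemma collect_neg_not_mem (lines : List String) (k : ℕ) (hk1 : 1 ≤ k) (hk : k ≤ lines.length)
    (hmem : "" ∉ (lines.drop (lines.length - k)).map PySem.Str.strip) :
    collect_rest lines (-(k : Int)) =
      (((lines.drop (lines.length - k)).map PySem.Str.strip) ++ (collect_rest lines 0).1,
       (collect_rest lines 0).2) := by
  induction k with
  | zero => omega
  | succ k' ih =>
    have hs : lines.length - (k' + 1) < lines.length := by omega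
    have hget : PySem.List.pyGet? lines (-((k' + 1 : ℕ) : Int)) =
        some lines[lines.length - (k' + 1)] := by
      rw [PySem.List.pyGet?_neg_natCast lines (k' + 1) (by omega) hk]
      simp [hs]
    have hdrop : lines.drop (lines.length - (k' + 1)) =
        lines[lines.length - (k' + 1)] :: lines.drop (lines.length - (k' + 1) + 1) :=
      List.drop_eq_getElem_cons hs
    have hne : ¬ (-((k' + 1 : ℕ) : Int)) = (lines.length : Int) := by
      intro h; omega
    rw [hdrop] at hmem
    simp only [List.map_cons, List.mem_cons] at hmem
    push_neg at hmem
    obtain ⟨hnb, hmem'⟩ := hmem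
    rw [collect_rest]
    simp only [hne, if_false]
    rw [hget, hdrop]
    simp only [List.map_cons]
    have hemp : (PySem.Str.strip lines[lines.length - (k' + 1)] == "") = false := by
      simpa using fun h => hnb h.symm
    simp only [hemp, Bool.false_eq_true, if_false]
    by_cases hk'1 : 1 ≤ k'
    · have harith : lines.length - (k' + 1) + 1 = lines.length - k' := by omega
      rw [harith] at hmem' ⊢
      have hcast : (-((k' + 1 : ℕ) : Int)) + 1 = -((k' : ℕ) : Int) := by push_cast; ring
      rw [hcast, ih hk'1 (by omega) (by simpa using hmem')]
      simp
    · have hz : k' = 0 := by omega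
      subst hz
      rw [show lines.length - (0 + 1) + 1 = lines.length from by omega]
      simp

lemma mem_isIn (c : Char) (s : String) (h : c ∈ s.toList) :
    PySem.Str.isIn (String.ofList [c]) s = true := by
  rw [PySem.Str.isIn_iff_infix]
  obtain ⟨pre, post, hsplit⟩ := List.append_of_mem h
  refine ⟨pre, post, ?_⟩
  simp [hsplit]

-- A's top level, written through collect_rest.
lemma a_eval (lines : List String) (i : Int) (l0 : String)
    (hget : PySem.List.pyGet? lines i = some l0) :
    parse_batch lines i =
      ((if is_empty_line (PySem.Str.strip l0) then []
        else (PySem.Str.strip l0).toList.map (fun c => String.ofList [c])).filter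
          (fun c => (collect_rest lines (i + 1)).1.all (fun l => PySem.Str.isIn c l)),
       (collect_rest lines (i + 1)).2) := by
  unfold parse_batch
  rw [hget]
  exact loop_eq_collect lines i _

-- B's top level, once the slice is identified as a drop, split on the index() lookup.
lemma alt_eval_some (lines : List String) (i : Int) (s : ℕ) (k : ℕ) (hs : s < lines.length)
    (hslice : PySem.List.slice lines (some i) none = lines.drop s)
    (hidx : PySem.List.index? ((lines.drop (s + 1)).map PySem.Str.strip) "" = some k) :
    parse_batch_alt lines i =
      (((PySem.Str.strip lines[s]).toList.filter
          (fun c => (((lines.drop (s + 1)).map PySem.Str.strip).take k).all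
            (fun line => PySem.Str.isIn (String.ofList [c]) line))).map
          (fun c => String.ofList [c]),
       min (i + (k : Int) + 2) (lines.length : Int)) := by
  unfold parse_batch_alt
  rw [hslice, List.drop_eq_getElem_cons hs]
  simp only [List.map_cons, hidx]
  rw [show ((k : Int) + 1 - 1) = ((k : ℕ) : Int) from by ring, PySem.List.slice_to_natCast]
  rw [show (i + ((k : Int) + 1) + 1) = i + (k : Int) + 2 from by ring]

lemma alt_eval_none (lines : List String) (i : Int) (s : ℕ) (hs : s < lines.length)
    (hslice : PySem.List.slice lines (some i) none = lines.drop s)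
    (hidx : PySem.List.index? ((lines.drop (s + 1)).map PySem.Str.strip) "" = none) :
    parse_batch_alt lines i =
      (((PySem.Str.strip lines[s]).toList.filter
          (fun c => ((lines.drop (s + 1)).map PySem.Str.strip).all
            (fun line => PySem.Str.isIn (String.ofList [c]) line))).map
          (fun c => String.ofList [c]),
       min (i + (((lines.drop (s + 1)).map PySem.Str.strip).length : Int) + 2)
         (lines.length : Int)) := by
  unfold parse_batch_alt
  rw [hslice, List.drop_eq_getElem_cons hs]
  simp only [List.map_cons, hidx]
  rw [show ((((lines.drop (s + 1)).map PySem.Str.strip).length : Int) + 1 - 1)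
        = ((((lines.drop (s + 1)).map PySem.Str.strip).length : ℕ) : Int) from by ring,
     PySem.List.slice_to_natCast, List.take_length]
  rw [show (i + ((((lines.drop (s + 1)).map PySem.Str.strip).length : Int) + 1) + 1)
        = i + (((lines.drop (s + 1)).map PySem.Str.strip).length : Int) + 2 from by ring]

-- A's initial chars filtered by a group = B's one-pass comprehension over the same group.
lemma chars_eq (l0 : String) (group : List String) :
    ((if is_empty_line (PySem.Str.strip l0) then []
      else (PySem.Str.strip l0).toList.map (fun c => String.ofList [c])).filter
        (fun c => group.all (fun l => PySem.Str.isIn c l)))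
      = ((PySem.Str.strip l0).toList.filter
          (fun c => group.all (fun line => PySem.Str.isIn (String.ofList [c]) line))).map
          (fun c => String.ofList [c]) := by
  rw [is_empty_line_strip]
  by_cases h : PySem.Str.strip l0 = ""
  · rw [h]
    simp
  · simp only [beq_iff_eq, h, if_false]
    rw [List.filter_map]
    rfl

-- every character of a stripped line is a substring of that line
lemma filter_isIn_self (l0 : String) :
    ((PySem.Str.strip l0).toList.map (fun c => String.ofList [c])).filter
        (fun c => PySem.Str.isIn c (PySem.Str.strip l0))
      = (PySem.Str.strip l0).toList.map (fun c => String.ofList [c]) := by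
  rw [List.filter_eq_self]
  intro a ha
  obtain ⟨c, hc, rfl⟩ := List.mem_map.mp ha
  exact mem_isIn c _ hc

lemma grp_pos (ts : List String) (h : ts ≠ []) : 1 ≤ (grp ts).2 := by
  cases ts with
  | nil => exact absurd rfl h
  | cons t r =>
    by_cases hb : t = ""
    · simp [grp, hb]
    · rw [grp_cons_ne t r hb]
      have := grp_nonneg r
      omega

lemma collect_at_zero (lines : List String) :
    collect_rest lines 0 =
      ((grp (lines.map PySem.Str.strip)).1, (grp (lines.map PySem.Str.strip)).2) := by
  have h0 : (0 : Int) = ((0 : ℕ) : Int) := rfl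
  rw [h0, collect_nonneg lines 0]
  simp

lemma cons_head_drop (lines : List String) (h : 0 < lines.length) :
    lines = lines[0] :: lines.drop 1 := by
  have hd := List.drop_eq_getElem_cons (l := lines) (i := 0) h
  simpa using hd

-- uniform form of collect_neg_not_mem for the index A starts its scan at (i + 1 = -(k) + 1)
lemma collect_neg_succ (lines : List String) (k : ℕ) (hk1 : 1 ≤ k) (hk : k ≤ lines.length)
    (hmem : "" ∉ (lines.drop (lines.length - k + 1)).map PySem.Str.strip) :
    collect_rest lines (-(k : Int) + 1) =
      ((lines.drop (lines.length - k + 1)).map PySem.Str.strip ++ (collect_rest lines 0).1,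
       (collect_rest lines 0).2) := by
  by_cases hk2 : 2 ≤ k
  · have hsn : lines.length - k + 1 = lines.length - (k - 1) := by omega
    have hcast : (-(k : Int) + 1) = -((k - 1 : ℕ) : Int) := by push_cast [hk1]; ring
    rw [hsn] at hmem ⊢
    rw [hcast, collect_neg_not_mem lines (k - 1) (by omega) (by omega) hmem]
  · have hkone : k = 1 := by omega
    subst hkone
    have hdrop : lines.drop (lines.length - 1 + 1) = ([] : List String) :=
      List.drop_eq_nil_of_le (by omega)
    rw [hdrop]
    norm_num

-- ===== VERDICT (by name: the statement is the Claim_ definition above) =====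
theorem parse_batch_spec : Claim_unchanged_parse_batch := by
  intro lines i _ hpre hD
  have hrange : -(lines.length : Int) ≤ i ∧ i < (lines.length : Int) := hpre
  by_cases hineg : 0 ≤ i
  · -- nonnegative start: both sides read the suffix lines[i:]
    obtain ⟨s, rfl⟩ : ∃ s : ℕ, i = (s : Int) := ⟨i.toNat, (Int.toNat_of_nonneg hineg).symm⟩
    have hs : s < lines.length := by exact_mod_cast hrange.2
    have hget : PySem.List.pyGet? lines (s : Int) = some lines[s] := by
      rw [PySem.List.pyGet?_natCast]
      simp [hs]
    have hslice : PySem.List.slice lines (some (s : Int)) none = lines.drop s := by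
      rw [PySem.List.slice_from lines (by positivity)]
      simp
    have hcast : ((s : Int) + 1) = ((s + 1 : ℕ) : Int) := by push_cast; ring
    have hlen : ((lines.drop (s + 1)).map PySem.Str.strip).length = lines.length - (s + 1) := by
      simp
    cases hidx : PySem.List.index? ((lines.drop (s + 1)).map PySem.Str.strip) "" with
    | some k =>
      have hmem : "" ∈ (lines.drop (s + 1)).map PySem.Str.strip := by
        rw [← PySem.List.index?_isSome_iff, hidx]; rfl
      obtain ⟨k', hk', hklt, hg⟩ := grp_mem _ hmem
      rw [hidx] at hk'
      obtain rfl : k = k' := by injection hk'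
      rw [a_eval lines _ _ hget, alt_eval_some lines _ s k hs hslice hidx]
      rw [hcast, collect_nonneg lines (s + 1), hg]
      simp only [Prod.mk.injEq]
      constructor
      · rw [chars_eq]
      · rw [min_eq_left (by omega)]
        push_cast
        ring
    | none =>
      have hmem : "" ∉ (lines.drop (s + 1)).map PySem.Str.strip := by
        rw [← PySem.List.index?_eq_none_iff]; exact hidx
      rw [a_eval lines _ _ hget, alt_eval_none lines _ s hs hslice hidx]
      rw [hcast, collect_nonneg lines (s + 1), grp_not_mem _ hmem]
      simp only [Prod.mk.injEq]
      constructor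
      · rw [chars_eq]
      · rw [min_eq_right (by omega)]
        omega
  · -- negative start index
    push_neg at hineg
    obtain ⟨k, rfl, hk1⟩ : ∃ k : ℕ, i = -(k : Int) ∧ 1 ≤ k :=
      ⟨(-i).toNat, by omega, by omega⟩
    have hkn : k ≤ lines.length := by omega
    have hs : lines.length - k < lines.length := by omega
    have hget : PySem.List.pyGet? lines (-(k : Int)) = some lines[lines.length - k] := by
      rw [PySem.List.pyGet?_neg_natCast lines k (by omega) hkn]
      simp [hs]
    have hslice : PySem.List.slice lines (some (-(k : Int))) none
        = lines.drop (lines.length - k) :=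
      PySem.List.slice_from_neg_natCast lines k (by omega)
    have hlen : ((lines.drop (lines.length - k + 1)).map PySem.Str.strip).length = k - 1 := by
      simp
      omega
    cases hidx : PySem.List.index? ((lines.drop (lines.length - k + 1)).map PySem.Str.strip) "" with
    | some k0 =>
      -- a blank line terminates the group before the end of the list
      have hmem : "" ∈ (lines.drop (lines.length - k + 1)).map PySem.Str.strip := by
        rw [← PySem.List.index?_isSome_iff, hidx]; rfl
      have hk2 : 2 ≤ k := by
        by_contra hlt
        have hkone : k = 1 := by omega
        subst hkone
        rw [show lines.length - 1 + 1 = lines.length from by omega] at hmem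
        simp at hmem
      obtain ⟨k', hk', hklt, hg⟩ := grp_mem _ hmem
      rw [hidx] at hk'
      obtain rfl : k0 = k' := by injection hk'
      have hklt' : k0 < k - 1 := by
        rw [hlen] at hklt
        exact hklt
      rw [a_eval lines _ _ hget, alt_eval_some lines _ _ k0 hs hslice hidx]
      have hsn : lines.length - k + 1 = lines.length - (k - 1) := by omega
      have hcast : (-(k : Int) + 1) = -((k - 1 : ℕ) : Int) := by push_cast [hk1]; ring
      rw [hsn] at hmem hg ⊢
      rw [hcast, collect_neg_mem lines (k - 1) (by omega) (by omega) hmem, hg]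
      simp only [Prod.mk.injEq]
      constructor
      · rw [chars_eq]
      · rw [min_eq_left (by omega)]
        push_cast [show (1 : ℕ) ≤ k - 1 from by omega]
        omega
    | none =>
      -- the group runs to the end of the list; ¬D_ pins the remaining shapes
      have hmem : "" ∉ (lines.drop (lines.length - k + 1)).map PySem.Str.strip := by
        rw [← PySem.List.index?_eq_none_iff]; exact hidx
      have htoNat : ((lines.length : Int) + -(k : Int) + 1).toNat = lines.length - k + 1 := by
        omega
      have hD' : ¬ (1 < lines.length) ∨
          ¬ (∀ l ∈ lines.take 1, PySem.Str.strip l ≠ "") := by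
        by_contra hcon
        push_neg at hcon
        exact hD ⟨by omega, hcon.1, hcon.2, by
          rw [htoNat]
          intro l hl hblank
          exact hmem (List.mem_map.mpr ⟨l, hl, hblank⟩)⟩
      have hn1 : 0 < lines.length := by omega
      have hlines0 := cons_head_drop lines hn1
      have htake1 : lines.take 1 = [lines[0]] := by
        conv_lhs => rw [hlines0]
        simp
      have hcollect0 : PySem.Str.strip lines[0] = "" →
          collect_rest lines 0 = ([], 1) := by
        intro hblank
        rw [collect_at_zero]
        conv_lhs => rw [hlines0]
        simp [grp, hblank]
      have hblank0 : PySem.Str.strip lines[0] = "" ∨ lines.length = 1 := by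
        rcases hD' with h | h
        · right; omega
        · left
          push_neg at h
          obtain ⟨l, hl, he⟩ := h
          rw [htake1] at hl
          simp at hl
          rw [← hl]; exact he
      rw [a_eval lines _ _ hget, alt_eval_none lines _ _ hs hslice hidx]
      rw [collect_neg_succ lines k hk1 hkn hmem]
      rcases hblank0 with hblank | hone
      · rw [hcollect0 hblank]
        simp only [List.append_nil, Prod.mk.injEq]
        constructor
        · rw [chars_eq]
        · rw [hlen, min_eq_left (by omega)]
          omega
      · have hkone : k = 1 := by omega
        have hdropT : lines.drop (lines.length - k + 1) = ([] : List String) :=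
          List.drop_eq_nil_of_le (by omega)
        have hi0 : lines.length - k = 0 := by omega
        have hdrop1 : lines.drop 1 = ([] : List String) := List.drop_eq_nil_of_le (by omega)
        have hmapstrip : lines.map PySem.Str.strip = [PySem.Str.strip lines[0]] := by
          conv_lhs => rw [hlines0]
          rw [hdrop1]
          rfl
        rw [hdropT, collect_at_zero, hmapstrip]
        simp only [hi0, List.map_nil, List.nil_append]
        rw [is_empty_line_strip]
        by_cases hbl : PySem.Str.strip lines[0] = ""
        · simp only [grp, hbl]
          simp [hkone, hone]
        · rw [grp_cons_ne _ _ hbl]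
          simp only [grp, beq_iff_eq, hbl, if_false, List.all_cons, List.all_nil,
            Bool.and_true, List.filter_nil, List.map_nil, Prod.mk.injEq]
          constructor
          · rw [filter_isIn_self lines[0]]
            simp
          · simp [hkone, hone]

theorem parse_batch_changed : Claim_changed_parse_batch := by
  unfold Claim_changed_parse_batch
  refine ⟨by decide, by decide, by decide, ?_, by decide, by decide⟩
  show parse_batch ["b", "ab"] (-1) = (["b"], 2)
  have e1 : ∀ chars : List String, parse_batch_loop ["b", "ab"] chars 1 = (chars, 2) := by
    intro chars
    rw [parse_batch_loop]
    norm_num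
  have e0 : parse_batch_loop ["b", "ab"] ["b"] 0 = (["b"], 2) := by
    rw [parse_batch_loop]
    rw [show PySem.List.pyGet? ["b", "ab"] ((0 : Int) + 1) = some "ab" from by decide]
    simp only [show is_empty_line (PySem.Str.strip "ab") = false from by decide,
      show (List.filter (fun c => PySem.Str.isIn c (PySem.Str.strip "ab")) ["b"]) = ["b"] from by
        decide]
    norm_num [e1]
  have eneg : parse_batch_loop ["b", "ab"] ["a", "b"] (-1) = (["b"], 2) := by
    rw [parse_batch_loop]
    rw [show PySem.List.pyGet? ["b", "ab"] ((-1 : Int) + 1) = some "b" from by decide]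
    simp only [show is_empty_line (PySem.Str.strip "b") = false from by decide,
      show (List.filter (fun c => PySem.Str.isIn c (PySem.Str.strip "b")) ["a", "b"]) = ["b"] from by
        decide]
    norm_num [e0]
  unfold parse_batch
  rw [show PySem.List.pyGet? ["b", "ab"] (-1) = some "ab" from by decide]
  simp only [show is_empty_line (PySem.Str.strip "ab") = false from by decide,
    Bool.false_eq_true, if_false,
    show ((PySem.Str.strip "ab").toList.map fun c => String.ofList [c]) = ["a", "b"] from by decide]
  exact eneg

theorem parse_batch_tight : Claim_exact_parse_batch := by
  intro lines i _ hpre hd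
  obtain ⟨hineg, hn2, htake, hdropD⟩ := hd
  have hrange : -(lines.length : Int) ≤ i ∧ i < (lines.length : Int) := hpre
  obtain ⟨k, rfl, hk1⟩ : ∃ k : ℕ, i = -(k : Int) ∧ 1 ≤ k :=
    ⟨(-i).toNat, by omega, by omega⟩
  have hkn : k ≤ lines.length := by omega
  have hs : lines.length - k < lines.length := by omega
  have hget : PySem.List.pyGet? lines (-(k : Int)) = some lines[lines.length - k] := by
    rw [PySem.List.pyGet?_neg_natCast lines k (by omega) hkn]
    simp [hs]
  have hslice : PySem.List.slice lines (some (-(k : Int))) none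
      = lines.drop (lines.length - k) :=
    PySem.List.slice_from_neg_natCast lines k (by omega)
  have htoNat : ((lines.length : Int) + -(k : Int) + 1).toNat = lines.length - k + 1 := by
    omega
  have hmem : "" ∉ (lines.drop (lines.length - k + 1)).map PySem.Str.strip := by
    intro hin
    obtain ⟨l, hl, hblank⟩ := List.mem_map.mp hin
    exact hdropD l (by rw [htoNat]; exact hl) hblank
  have hidx : PySem.List.index? ((lines.drop (lines.length - k + 1)).map PySem.Str.strip) ""
      = none := (PySem.List.index?_eq_none_iff _ _).mpr hmem
  have hlines0 := cons_head_drop lines (by omega)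
  have htake1 : lines.take 1 = [lines[0]] := by
    conv_lhs => rw [hlines0]
    simp
  have hstrip0 : PySem.Str.strip lines[0] ≠ "" :=
    htake lines[0] (by rw [htake1]; exact List.mem_singleton.mpr rfl)
  -- A's returned index is at least 2: the wrapped scan passes the nonblank lines[0]
  have hc0 : 2 ≤ (collect_rest lines 0).2 := by
    rw [collect_at_zero]
    conv_rhs => rw [hlines0, List.map_cons]
    rw [grp_cons_ne _ _ hstrip0]
    have hne1 : (lines.drop 1).map PySem.Str.strip ≠ [] := by
      simp only [ne_eq, List.map_eq_nil_iff, List.drop_eq_nil_iff]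
      omega
    have := grp_pos _ hne1
    omega
  have hA2 : (collect_rest lines (-(k : Int) + 1)).2 = (collect_rest lines 0).2 := by
    rw [collect_neg_succ lines k hk1 hkn hmem]
  have hlenT : ((lines.drop (lines.length - k + 1)).map PySem.Str.strip).length = k - 1 := by
    simp
    omega
  rw [a_eval lines _ _ hget, alt_eval_none lines _ _ hs hslice hidx]
  simp only [ne_eq, Prod.mk.injEq, not_and]
  intro _
  rw [hA2, hlenT, min_eq_left (by omega)]
  omega
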